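-- pv_equiv track=rewrite | github.com/Kasthuri19/python-BootCamp | inplacemergefunction.py | mergeInplace_recursion
-- ===== SOURCE A (Python) =====
-- def mergeInplace_recursion(arr, first, second, end):
--     if first>=second or second>end:     #while first<second and second<=end:
--         return arr
--
--     if arr[first]>arr[second]:
--         min_value=arr[second]
--
--         s=second
--
--         while s>first:
--             arr[s]=arr[s-1]
--             s=s-1
--         arr[first]=min_value
--
--         mergeInplace(arr, first+1, second+1, end) #function call
--     else:
--         mergeInplace(arr, first+1, second, end)
--
--     return arr
--
-- def mergeInplace(arr,first,second,end):
--     while first<second and second<=end: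
--         if arr[first]>arr[second]:
--             min_value=arr[second]
--
--             s=second
--
--             while s>first:
--                 arr[s]=arr[s-1]
--                 s=s-1
--             arr[first]=min_value
--             first+=1
--             second+=1
--         else:
--             first+=1
--     return arr
-- ===== SOURCE B (Python) =====
-- # B: copy-out two-pointer merge of the two adjacent segments (tie -> left),
-- # instead of A's rotate-to-insert shifting; like A it mutates arr in place and returns it.
-- def mergeInplace_recursion(arr, first, second, end):
--     if first >= second or second > end:
--         return arr
--     left = arr[first:second]
--     right = arr[second:end + 1]
--     i = j = 0
--     merged = []
--     while i < len(left) and j < len(right):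
--         if left[i] <= right[j]:
--             merged.append(left[i]); i += 1
--         else:
--             merged.append(right[j]); j += 1
--     merged.extend(left[i:])
--     merged.extend(right[j:])
--     arr[first:end + 1] = merged
--     return arr
-- ===== Notes on version B (the rewrite author's own statement) =====
-- stated objective: alternative
-- what changed: A merges the two adjacent runs in place by repeatedly rotating the whole remaining left run one slot to insert each right element; B copies the two runs out, does a single two-pointer merge with an output buffer, and writes it back with one slice assignment.
-- outside the precondition, e.g. on mergeInplace_recursion([3, 1, 2], -1, 1, 2): A returns [1, 2, 3], B returns [3, 1, 1, 2]
import Mathlib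
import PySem

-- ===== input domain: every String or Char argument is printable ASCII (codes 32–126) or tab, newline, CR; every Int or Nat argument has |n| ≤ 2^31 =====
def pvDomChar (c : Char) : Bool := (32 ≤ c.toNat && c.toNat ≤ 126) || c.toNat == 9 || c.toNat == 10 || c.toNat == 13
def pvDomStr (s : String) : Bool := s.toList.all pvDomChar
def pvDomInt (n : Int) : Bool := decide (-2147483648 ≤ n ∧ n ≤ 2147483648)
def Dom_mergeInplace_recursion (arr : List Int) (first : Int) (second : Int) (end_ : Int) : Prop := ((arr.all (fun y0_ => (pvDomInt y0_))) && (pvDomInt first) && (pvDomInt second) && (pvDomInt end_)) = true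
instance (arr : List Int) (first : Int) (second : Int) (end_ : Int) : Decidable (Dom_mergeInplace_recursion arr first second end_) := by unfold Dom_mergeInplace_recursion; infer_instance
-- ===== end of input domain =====

-- B replaces A's rotate-to-insert shifting pass by a copy-out two-pointer merge of the two
-- adjacent runs; both Pythons mutate arr in place the same way, and the theorems are about
-- the returned value.


-- ===== PORT A =====
-- inner while loop 'while s > first: arr[s] = arr[s-1]; s = s-1' (pyGetD/pySetD are exact
-- on the in-range indices Pre_ admits; Python raises on the out-of-range ones Pre_ excludes)
def shiftGo : Nat → List Int → Int → Int → List Int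
  | 0, arr, _, _ => arr
  | n + 1, arr, first, s =>
    if first < s then
      shiftGo n (PySem.List.pySetD arr s (PySem.List.pyGetD arr (s - 1) 0)) first (s - 1)
    else arr

-- the fuel (s - first).toNat is exactly the number of iterations of the Python while loop
def shiftA (arr : List Int) (first : Int) (s : Int) : List Int :=
  shiftGo (s - first).toNat arr first s

-- the helper function mergeInplace (the iterative 'while first<second and second<=end' loop)
def mergeGo : Nat → List Int → Int → Int → Int → List Int
  | 0, arr, _, _, _ => arr
  | n + 1, arr, first, second, end_ =>
    if first < second ∧ second ≤ end_ then
      if PySem.List.pyGetD arr first 0 > PySem.List.pyGetD arr second 0 then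
        mergeGo n (PySem.List.pySetD (shiftA arr first second) first (PySem.List.pyGetD arr second 0))
          (first + 1) (second + 1) end_
      else
        mergeGo n arr (first + 1) second end_
    else arr

-- the fuel (end_ + 1 - first).toNat bounds the loop: first increases by 1 every iteration
def mergeLoopA (arr : List Int) (first : Int) (second : Int) (end_ : Int) : List Int :=
  mergeGo (end_ + 1 - first).toNat arr first second end_

def mergeInplace_recursion (arr : List Int) (first : Int) (second : Int) (end_ : Int) : List Int :=
  if first ≥ second ∨ second > end_ then arr
  else if PySem.List.pyGetD arr first 0 > PySem.List.pyGetD arr second 0 then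
    mergeLoopA (PySem.List.pySetD (shiftA arr first second) first (PySem.List.pyGetD arr second 0))
      (first + 1) (second + 1) end_
  else
    mergeLoopA arr (first + 1) second end_

-- ===== PORT B =====
-- the while loop over counters i, j with an output accumulator, as structural recursion on
-- the two remaining suffixes; the trailing extends are the base cases
def mergeTP : List Int → List Int → List Int
  | [], r => r
  | l, [] => l
  | a :: l, b :: r => if a ≤ b then a :: mergeTP l (b :: r) else b :: mergeTP (a :: l) r
termination_by l r => l.length + r.length

def mergeInplace_recursion_alt (arr : List Int) (first : Int) (second : Int) (end_ : Int) : List Int :=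
  if first ≥ second ∨ second > end_ then arr
  else
    let left := PySem.List.slice arr (some first) (some second)
    let right := PySem.List.slice arr (some second) (some (end_ + 1))
    let merged := mergeTP left right
    -- arr[first:end+1] = merged; return arr
    PySem.List.slice arr none (some first) ++ merged ++ PySem.List.slice arr (some (end_ + 1)) none

-- ===== PRECONDITION & SPEC =====
-- Pre_ excludes active-window calls (first < second ≤ end) whose window is not inside the
-- array: with end ≥ len(arr) A raises IndexError, and with a negative first A's value comes
-- from Python's negative-index wraparound, outside the function's natural index domain.
def Pre_mergeInplace_recursion (arr : List Int) (first : Int) (second : Int) (end_ : Int) : Prop :=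
  (first < second ∧ second ≤ end_) → (0 ≤ first ∧ end_ < (arr.length : Int))
instance (arr : List Int) (first : Int) (second : Int) (end_ : Int) : Decidable (Pre_mergeInplace_recursion arr first second end_) := by unfold Pre_mergeInplace_recursion; infer_instance

def pvWitness_mergeInplace_recursion : List Int × Int × Int × Int := ([2, 1, 3], 0, 1, 2)

def Spec_mergeInplace_recursion (arr : List Int) (first : Int) (second : Int) (end_ : Int) (out : List Int) : Prop := out = mergeInplace_recursion_alt arr first second end_
instance (arr : List Int) (first : Int) (second : Int) (end_ : Int) (out : List Int) : Decidable (Spec_mergeInplace_recursion arr first second end_ out) := by unfold Spec_mergeInplace_recursion; infer_instance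

-- ===== CLAIM (what is proved, stated in full; the proofs are below) =====
def Claim_equal_mergeInplace_recursion : Prop := ∀ (arr : List Int) (first : Int) (second : Int) (end_ : Int), Dom_mergeInplace_recursion arr first second end_ → Pre_mergeInplace_recursion arr first second end_ → Spec_mergeInplace_recursion arr first second end_ (mergeInplace_recursion arr first second end_)

-- ===== LEMMAS AND PROOFS =====

theorem pvWitness_ok : Dom_mergeInplace_recursion pvWitness_mergeInplace_recursion.1 pvWitness_mergeInplace_recursion.2.1 pvWitness_mergeInplace_recursion.2.2.1 pvWitness_mergeInplace_recursion.2.2.2 ∧ Pre_mergeInplace_recursion pvWitness_mergeInplace_recursion.1 pvWitness_mergeInplace_recursion.2.1 pvWitness_mergeInplace_recursion.2.2.1 pvWitness_mergeInplace_recursion.2.2.2 := by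
  decide

-- reading at the boundary of an append
theorem pyGetD_append_length (l r : List Int) (y d : Int) :
    PySem.List.pyGetD (l ++ y :: r) (l.length : Int) d = y := by
  simp [List.getD_eq_getElem?_getD]

-- writing at the boundary of an append
theorem pySetD_append_length (l r : List Int) (y v : Int) :
    PySem.List.pySetD (l ++ y :: r) (l.length : Int) v = l ++ v :: r := by
  simp [List.set_cons_zero]

theorem headD_concat (M : List Int) (m x : Int) : (M ++ [m]).headD x = M.headD m := by
  cases M <;> simp

-- the shift loop rotates the window M ++ [x] to headD-duplicated M (x is overwritten)
theorem shiftGo_spec (M : List Int) : ∀ (n : Nat) (p rest : List Int) (x : Int), M.length ≤ n →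
    shiftGo n (p ++ M ++ x :: rest) (p.length : Int) ((p.length : Int) + (M.length : Int))
      = p ++ M.headD x :: (M ++ rest) := by
  induction M using List.reverseRecOn with
  | nil =>
    intro n p rest x _
    cases n <;> simp [shiftGo]
  | append_singleton M' m ih =>
    intro n p rest x hn
    obtain ⟨n', rfl⟩ : ∃ n', n = n' + 1 := by
      cases n
      · simp at hn
      · exact ⟨_, rfl⟩
    rw [shiftGo]
    have hlt : (p.length : Int) < (p.length : Int) + ((M' ++ [m]).length : Int) := by
      simp
    rw [if_pos hlt]
    have e1 : (p.length : Int) + ((M' ++ [m]).length : Int) - 1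
        = ((p ++ M').length : Int) := by simp; omega
    have harr : p ++ (M' ++ [m]) ++ x :: rest = (p ++ M') ++ m :: (x :: rest) := by simp
    have e2 : (p.length : Int) + ((M' ++ [m]).length : Int)
        = ((p ++ M' ++ [m]).length : Int) := by simp
    rw [e1, harr, pyGetD_append_length]
    rw [show (p ++ M') ++ m :: (x :: rest) = (p ++ M' ++ [m]) ++ x :: rest by simp, e2,
      pySetD_append_length]
    rw [show (p ++ M' ++ [m]) ++ m :: rest = p ++ M' ++ m :: (m :: rest) by simp]
    rw [show ((p ++ M').length : Int) = (p.length : Int) + (M'.length : Int) by simp]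
    rw [ih n' p (m :: rest) m (by simp at hn ⊢; omega), headD_concat]
    simp

theorem shiftA_spec (M : List Int) (p rest : List Int) (x : Int) :
    shiftA (p ++ M ++ x :: rest) (p.length : Int) ((p.length : Int) + (M.length : Int))
      = p ++ M.headD x :: (M ++ rest) := by
  rw [shiftA, show ((p.length : Int) + (M.length : Int) - (p.length : Int)).toNat = M.length by
    omega]
  exact shiftGo_spec M M.length p rest x le_rfl

-- one insertion step of A: the window M ++ [x] becomes x :: M
theorem stepA_spec (M p rest : List Int) (x : Int) :
    PySem.List.pySetD
        (shiftA (p ++ M ++ x :: rest) (p.length : Int) ((p.length : Int) + (M.length : Int)))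
        (p.length : Int) x
      = p ++ x :: (M ++ rest) := by
  rw [shiftA_spec]
  exact pySetD_append_length p (M ++ rest) (M.headD x) x

-- the iterative loop is the two-pointer merge of the two adjacent runs
theorem loop_spec : ∀ (n : Nat) (L R p suf : List Int), L.length + R.length ≤ n →
    mergeGo n (p ++ L ++ R ++ suf) (p.length : Int) ((p.length : Int) + (L.length : Int))
      ((p.length : Int) + (L.length : Int) + (R.length : Int) - 1)
      = p ++ mergeTP L R ++ suf := by
  intro n
  induction n with
  | zero =>
    intro L R p suf h
    have hL : L = [] := by cases L <;> simp_all
    have hR : R = [] := by cases R <;> simp_all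
    subst hL; subst hR
    simp [mergeGo, mergeTP]
  | succ n ih =>
    intro L R p suf h
    match L, R with
    | [], R =>
      rw [mergeGo]
      simp [mergeTP]
    | a :: L', [] =>
      rw [mergeGo]
      have : ¬ (((p.length : Int) < (p.length : Int) + ((a :: L').length : Int)) ∧
          ((p.length : Int) + ((a :: L').length : Int) ≤
            (p.length : Int) + ((a :: L').length : Int) + (([] : List Int).length : Int) - 1)) := by
        simp
      rw [if_neg this]
      simp [mergeTP]
    | a :: L', b :: R' =>
      rw [mergeGo]
      have hc : ((p.length : Int) < (p.length : Int) + (((a :: L')).length : Int)) ∧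
          ((p.length : Int) + ((a :: L').length : Int) ≤
            (p.length : Int) + ((a :: L').length : Int) + ((b :: R').length : Int) - 1) := by
        refine ⟨by simp, by simp⟩
      rw [if_pos hc]
      have hga : PySem.List.pyGetD (p ++ (a :: L') ++ (b :: R') ++ suf) (p.length : Int) 0 = a := by
        rw [show p ++ (a :: L') ++ (b :: R') ++ suf = p ++ a :: (L' ++ (b :: R') ++ suf) by simp]
        exact pyGetD_append_length p _ a 0
      have hgb : PySem.List.pyGetD (p ++ (a :: L') ++ (b :: R') ++ suf)
          ((p.length : Int) + (((a :: L')).length : Int)) 0 = b := by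
        rw [show p ++ (a :: L') ++ (b :: R') ++ suf = (p ++ (a :: L')) ++ b :: (R' ++ suf) by simp,
          show (p.length : Int) + ((a :: L').length : Int) = ((p ++ (a :: L')).length : Int) by
            simp]
        exact pyGetD_append_length _ _ b 0
      rw [hga, hgb]
      by_cases hab : a > b
      · rw [if_pos hab]
        have hstep : PySem.List.pySetD
            (shiftA (p ++ (a :: L') ++ (b :: R') ++ suf) (p.length : Int)
              ((p.length : Int) + ((a :: L').length : Int))) (p.length : Int) b
            = p ++ b :: ((a :: L') ++ (R' ++ suf)) := by
          rw [show p ++ (a :: L') ++ (b :: R') ++ suf = p ++ (a :: L') ++ b :: (R' ++ suf) by simp]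
          exact stepA_spec (a :: L') p (R' ++ suf) b
        rw [hstep]
        have harr : p ++ b :: ((a :: L') ++ (R' ++ suf))
            = (p ++ [b]) ++ (a :: L') ++ R' ++ suf := by simp
        have e1 : (p.length : Int) + 1 = ((p ++ [b]).length : Int) := by simp
        have e2 : (p.length : Int) + ((a :: L').length : Int) + 1
            = ((p ++ [b]).length : Int) + ((a :: L').length : Int) := by simp; omega
        have e3 : (p.length : Int) + ((a :: L').length : Int) + ((b :: R').length : Int) - 1
            = ((p ++ [b]).length : Int) + ((a :: L').length : Int) + (R'.length : Int) - 1 := by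
          simp; omega
        rw [harr, e1, e2, e3, ih (a :: L') R' (p ++ [b]) suf (by simp at h ⊢; omega)]
        have : mergeTP (a :: L') (b :: R') = b :: mergeTP (a :: L') R' := by
          rw [mergeTP]
          rw [if_neg (by omega)]
        rw [this]
        simp
      · rw [if_neg hab]
        have harr : p ++ (a :: L') ++ (b :: R') ++ suf
            = (p ++ [a]) ++ L' ++ (b :: R') ++ suf := by simp
        have e1 : (p.length : Int) + 1 = ((p ++ [a]).length : Int) := by simp
        have e2 : (p.length : Int) + ((a :: L').length : Int)
            = ((p ++ [a]).length : Int) + (L'.length : Int) := by simp; omega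
        rw [harr, e1, e2, ih L' (b :: R') (p ++ [a]) suf (by simp at h ⊢; omega)]
        have : mergeTP (a :: L') (b :: R') = a :: mergeTP L' (b :: R') := by
          rw [mergeTP]
          rw [if_pos (by omega)]
        rw [this]
        simp

-- A's entry function is one unfolding of the iterative loop
theorem entry_eq_loop (arr : List Int) (first second end_ : Int) :
    mergeInplace_recursion arr first second end_ = mergeLoopA arr first second end_ := by
  rw [mergeInplace_recursion]
  conv_rhs => rw [mergeLoopA]
  by_cases h : first < second ∧ second ≤ end_
  · rw [show (end_ + 1 - first).toNat = (end_ + 1 - (first + 1)).toNat + 1 by omega,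
      mergeGo, if_pos h, if_neg (show ¬ (first ≥ second ∨ second > end_) by omega)]
    simp only [mergeLoopA]
  · rw [if_pos (show first ≥ second ∨ second > end_ by omega)]
    rcases (end_ + 1 - first).toNat with _ | k
    · rfl
    · rw [mergeGo, if_neg h]

-- ===== VERDICT (by name: the statement is the Claim_ definition above) =====
theorem mergeInplace_recursion_spec : Claim_equal_mergeInplace_recursion := by
  intro arr first second end_ _ hpre
  unfold Spec_mergeInplace_recursion
  by_cases hact : first < second ∧ second ≤ end_
  · obtain ⟨hf, he⟩ := hpre hact
    obtain ⟨h12, h2e⟩ := hact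
    -- decompose arr into prefix, left run, right run, suffix
    set p := arr.take first.toNat with hp
    set L := (arr.drop first.toNat).take (second.toNat - first.toNat) with hL
    set R := (arr.drop second.toNat).take ((end_ + 1).toNat - second.toNat) with hR
    set suf := arr.drop (end_ + 1).toNat with hsuf
    have hplen : (p.length : Int) = first := by
      simp [hp]; omega
    have hLlen : (L.length : Int) = second - first := by
      simp [hL]; omega
    have hRlen : (R.length : Int) = end_ + 1 - second := by
      simp [hR]; omega
    have hpL : p ++ L = arr.take second.toNat := by
      rw [hp, hL, ← List.take_add,
        show first.toNat + (second.toNat - first.toNat) = second.toNat by omega]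
    have hRsuf : R ++ suf = arr.drop second.toNat := by
      have h0 := List.take_append_drop ((end_ + 1).toNat - second.toNat) (arr.drop second.toNat)
      rw [List.drop_drop,
        show second.toNat + ((end_ + 1).toNat - second.toNat) = (end_ + 1).toNat by omega] at h0
      rw [hR, hsuf, h0]
    have harr : arr = p ++ L ++ R ++ suf := by
      calc arr = arr.take second.toNat ++ arr.drop second.toNat :=
            (List.take_append_drop _ _).symm
        _ = (p ++ L) ++ (R ++ suf) := by rw [hpL, hRsuf]
        _ = p ++ L ++ R ++ suf := by simp
    have hB : mergeInplace_recursion_alt arr first second end_ = p ++ mergeTP L R ++ suf := by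
      rw [mergeInplace_recursion_alt]
      rw [if_neg (by omega)]
      have hleft : PySem.List.slice arr (some first) (some second) = L := by
        rw [PySem.List.slice_toNat arr hf (by omega)]
      have hright : PySem.List.slice arr (some second) (some (end_ + 1)) = R := by
        rw [PySem.List.slice_toNat arr (by omega) (by omega)]
      have hpre' : PySem.List.slice arr none (some first) = p := by
        rw [PySem.List.slice_to arr hf]
      have hsuf' : PySem.List.slice arr (some (end_ + 1)) none = suf := by
        rw [PySem.List.slice_from arr (by omega)]
      rw [hleft, hright, hpre', hsuf']
    rw [hB, entry_eq_loop]
    calc mergeLoopA arr first second end_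
        = mergeGo (L.length + R.length) (p ++ L ++ R ++ suf) (p.length : Int)
            ((p.length : Int) + (L.length : Int))
            ((p.length : Int) + (L.length : Int) + (R.length : Int) - 1) := by
          rw [mergeLoopA, ← harr]
          congr 1 <;> omega
      _ = p ++ mergeTP L R ++ suf := loop_spec (L.length + R.length) L R p suf (le_refl _)
  · rw [mergeInplace_recursion, mergeInplace_recursion_alt, if_pos (by omega), if_pos (by omega)]
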